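-- pv_equiv track=rewrite | github.com/kkr010128/codebert | problem152/problem152_71.py | check
-- ===== SOURCE A (Python) =====
-- def check(S):
--   h = 0
--   for i in range(len(S)):
--     if h + S[i][0] < 0:
--       return -1
--     else:
--       h += S[i][1]
--   return h
-- ===== SOURCE B (Python) =====
-- def check(S):
--   prefixes = [0]
--   for _, b in S:
--     prefixes.append(prefixes[-1] + b)
--   for p, (a, _) in zip(prefixes, S):
--     if p + a < 0:
--       return -1
--   return prefixes[-1]
-- ===== Notes on version B (the rewrite author's own statement) =====
-- stated objective: alternative
-- what changed: Replaces the interleaved accumulate-and-check loop by building a prefix-sum table of heights first and then a separate pass over zip(prefixes, S) that checks the constraint.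
import Mathlib
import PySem

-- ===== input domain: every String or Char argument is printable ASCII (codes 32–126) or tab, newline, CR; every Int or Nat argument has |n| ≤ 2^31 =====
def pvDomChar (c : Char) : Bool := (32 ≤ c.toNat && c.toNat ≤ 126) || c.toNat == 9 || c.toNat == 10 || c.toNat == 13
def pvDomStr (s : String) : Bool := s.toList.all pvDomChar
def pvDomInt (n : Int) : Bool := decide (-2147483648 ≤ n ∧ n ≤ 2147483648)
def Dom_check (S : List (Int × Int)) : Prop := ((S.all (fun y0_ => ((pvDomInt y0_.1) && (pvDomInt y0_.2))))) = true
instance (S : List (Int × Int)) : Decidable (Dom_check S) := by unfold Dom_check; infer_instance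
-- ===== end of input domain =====

-- B builds the prefix-sum height table first, then checks the constraint in a separate pass (alternative decomposition).

-- ===== PORT A =====
-- the Python for-loop with early return, as structural recursion on the remaining list with state h
def checkGo (S : List (Int × Int)) (h : Int) : Int :=
  match S with
  | [] => h
  | (a, b) :: t => if h + a < 0 then -1 else checkGo t (h + b)

def check (S : List (Int × Int)) : Int := checkGo S 0

-- ===== PORT B =====
-- first pass: prefixes = [0]; for _, b in S: prefixes.append(prefixes[-1] + b)
def buildPrefixes (S : List (Int × Int)) : List Int :=
  S.foldl (fun acc p => acc ++ [acc.getLast! + p.2]) [0]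

-- second pass over zip(prefixes, S); return -1 if any violation, else prefixes[-1]
def check_alt (S : List (Int × Int)) : Int :=
  let prefixes := buildPrefixes S
  if (List.zip prefixes S).any (fun pr => pr.1 + pr.2.1 < 0) then -1
  else prefixes.getLast!

-- ===== PRECONDITION & SPEC =====
def Spec_check (S : List (Int × Int)) (out : Int) : Prop := out = check_alt S
instance (S : List (Int × Int)) (out : Int) : Decidable (Spec_check S out) := by unfold Spec_check; infer_instance

-- ===== CLAIM (what is proved, stated in full; the proofs are below) =====
def Claim_equal_check : Prop := ∀ (S : List (Int × Int)), Dom_check S → Spec_check S (check S)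

-- ===== LEMMAS AND PROOFS =====

-- abstract prefix list starting at h
def pf (h : Int) (S : List (Int × Int)) : List Int :=
  match S with
  | [] => [h]
  | (_, b) :: t => h :: pf (h + b) t

theorem pf_ne_nil (h : Int) (S : List (Int × Int)) : pf h S ≠ [] := by
  cases S with
  | nil => simp [pf]
  | cons p t => cases p; simp [pf]

theorem foldl_pf (S : List (Int × Int)) (pre : List Int) (h : Int) :
    S.foldl (fun acc p => acc ++ [acc.getLast! + p.2]) (pre ++ [h]) = pre ++ pf h S := by
  induction S generalizing pre h with
  | nil => simp [pf]
  | cons p t ih =>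
    cases p with
    | mk a b =>
      have hl : (pre ++ [h]).getLast! = h := by
        simp [List.getLast!_eq_getLast?_getD]
      simp only [List.foldl_cons, hl, pf]
      have h2 := ih (pre ++ [h]) (h + b)
      simp only [List.append_assoc] at h2 ⊢
      rw [h2]; simp

theorem buildPrefixes_eq_pf (S : List (Int × Int)) : buildPrefixes S = pf 0 S := by
  have := foldl_pf S [] 0
  simpa [buildPrefixes] using this

-- the alt computation on the abstract prefixes
def altGo (h : Int) (S : List (Int × Int)) : Int :=
  if (List.zip (pf h S) S).any (fun pr => pr.1 + pr.2.1 < 0) then -1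
  else (pf h S).getLast!

theorem checkGo_eq_altGo (S : List (Int × Int)) (h : Int) : checkGo S h = altGo h S := by
  induction S generalizing h with
  | nil => simp [checkGo, altGo, pf]
  | cons p t ih =>
    cases p with
    | mk a b =>
      by_cases hv : h + a < 0
      · simp [checkGo, altGo, pf, hv]
      · obtain ⟨x, xs, hx⟩ := List.exists_cons_of_ne_nil (pf_ne_nil (h + b) t)
        have hlast : (h :: pf (h + b) t).getLast! = (pf (h + b) t).getLast! := by
          rw [hx]
          simp [List.getLast!_eq_getLast?_getD, List.getLast?_cons_cons]
        simp only [checkGo, altGo, pf, ih, List.zip_cons_cons, List.any_cons]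
        rw [if_neg hv, decide_eq_false hv, hlast, Bool.false_or]

-- ===== VERDICT (by name: the statement is the Claim_ definition above) =====
theorem check_spec : Claim_equal_check := by
  intro S _
  unfold Spec_check check check_alt
  rw [buildPrefixes_eq_pf]
  exact checkGo_eq_altGo S 0
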